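-- pv_equiv track=rewrite | github.com/tyhts0829/graft | src/grafix/interactive/parameter_gui/labeling.py | effect_step_ordinals_by_site
-- ===== SOURCE A (Python) =====
-- from collections import Counter, defaultdict
-- from collections.abc import Callable, Hashable, Mapping
--
-- EffectStepKey = tuple[str, str]  # (op, site_id)
--
-- def effect_step_ordinals_by_site(
--     step_info_by_site: Mapping[EffectStepKey, tuple[str, int]],
-- ) -> dict[EffectStepKey, int]:
--     """同一チェーン内の “同一 op の出現回数” でステップ連番を計算する。"""
--
--     steps_by_chain: dict[str, list[tuple[int, str, str]]] = {}
--     for (op, site_id), (chain_id, step_index) in step_info_by_site.items():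
--         steps_by_chain.setdefault(str(chain_id), []).append(
--             (int(step_index), op, site_id)
--         )
--
--     out: dict[EffectStepKey, int] = {}
--     for chain_id, steps in steps_by_chain.items():
--         counts: dict[str, int] = defaultdict(int)
--         for _step_index, op, site_id in sorted(steps):
--             counts[op] += 1
--             out[(op, site_id)] = int(counts[op])
--     return out
-- ===== SOURCE B (Python) =====
-- from collections import Counter
--
--
-- def effect_step_ordinals_by_site(step_info_by_site):
--     """Flat formulation: one globally sorted pass over (chain rank, step_index, op,
--     site_id) rows with a single Counter keyed by (chain rank, op)."""
--     chain_rank = {}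
--     rows = []
--     for (op, site_id), (chain_id, step_index) in step_info_by_site.items():
--         rank = chain_rank.setdefault(str(chain_id), len(chain_rank))
--         rows.append((rank, int(step_index), op, site_id))
--     counts = Counter()
--     out = {}
--     for rank, _step_index, op, site_id in sorted(rows):
--         counts[(rank, op)] += 1
--         out[(op, site_id)] = counts[(rank, op)]
--     return out
-- ===== Notes on version B (the rewrite author's own statement) =====
-- stated objective: alternative
-- what changed: B replaces A's per-chain grouping dict, per-chain sort and per-chain reset counter with one flat pass: it assigns each chain a first-occurrence rank, builds a single list of (rank, step_index, op, site_id) rows, sorts it once globally, and numbers steps with a single Counter keyed (rank, op); Pre_ only states the dict invariant of the input (distinct (op, site_id) keys), which every real Python input satisfies.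
import Mathlib
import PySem

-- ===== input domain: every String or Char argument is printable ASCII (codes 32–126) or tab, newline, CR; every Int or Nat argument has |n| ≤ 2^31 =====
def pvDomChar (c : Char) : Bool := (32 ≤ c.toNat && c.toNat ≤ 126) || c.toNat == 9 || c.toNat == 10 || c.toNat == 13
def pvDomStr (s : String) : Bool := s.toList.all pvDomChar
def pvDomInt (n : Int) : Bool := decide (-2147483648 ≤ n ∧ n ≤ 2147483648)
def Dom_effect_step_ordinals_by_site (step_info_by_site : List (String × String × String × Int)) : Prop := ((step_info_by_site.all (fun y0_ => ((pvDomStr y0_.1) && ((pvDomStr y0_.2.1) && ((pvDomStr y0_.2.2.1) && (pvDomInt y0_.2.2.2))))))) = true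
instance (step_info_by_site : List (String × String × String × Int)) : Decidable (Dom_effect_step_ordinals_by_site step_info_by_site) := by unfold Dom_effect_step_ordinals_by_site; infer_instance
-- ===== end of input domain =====

-- B replaces A's per-chain grouping dict + per-chain sort + per-chain counter by one flat
-- globally sorted pass with a single counter keyed (chain rank, op); same return value
-- (objective: alternative, not faster).

-- ===== PORT A =====
-- Python's tuple comparison (i, op, sid) < (j, o, s), written out component-wise:
-- Lean/Mathlib's '<' on products is pointwise, not Python's lexicographic order, so the
-- lexicographic comparison is spelled out here (exact: Int and String '<' are Python's).
def pvTripLt (a b : Int × String × String) : Bool :=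
  if a.1 < b.1 then true
  else if b.1 < a.1 then false
  else if a.2.1 < b.2.1 then true
  else if b.2.1 < a.2.1 then false
  else decide (a.2.2 < b.2.2)

-- sorted(steps): PySem.List.sorted's own algorithm (sorted_eq_foldl_insertBy) with the
-- tuple-lexicographic comparator above written out (exact on this argument: the comparator
-- is Python's tuple '<').
def pvSortSteps (l : List (Int × String × String)) : List (Int × String × String) :=
  l.foldl (fun acc x => PySem.List.insertBy (fun a b => pvTripLt a b) x acc) []

-- steps_by_chain.setdefault(str(chain_id), []).append(...): chain_id is typed str, so str()
-- is the identity; setdefault-then-append is Dict.modify with default [] (int(step_index) is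
-- the identity on an int).
def pvStepsByChain (input : List (String × String × String × Int)) :
    PySem.Dict String (List (Int × String × String)) :=
  input.foldl (fun d e => d.modify e.2.2.1 [] (· ++ [(e.2.2.2, e.1, e.2.1)])) PySem.Dict.empty

-- one iteration of A's inner loop: counts[op] += 1; out[(op, site_id)] = int(counts[op])
def pvChainStep (st : PySem.Dict String Int × PySem.Dict (String × String) Int)
    (t : Int × String × String) : PySem.Dict String Int × PySem.Dict (String × String) Int :=
  let counts := st.1.modify t.2.1 0 (· + 1)
  (counts, st.2.insert (t.2.1, t.2.2) (counts.getD t.2.1 0))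

def effect_step_ordinals_by_site (step_info_by_site : List (String × String × String × Int)) : List (String × String × Int) :=
  ((pvStepsByChain step_info_by_site).items.foldl
    (fun out p => ((pvSortSteps p.2).foldl pvChainStep (PySem.Dict.empty, out)).2)
    PySem.Dict.empty).items.map (fun q => (q.1.1, q.1.2, q.2))

-- ===== PORT B =====
-- Python's 4-tuple comparison (rank, i, op, sid) < …, written out (see pvTripLt above).
def pvQuadLt (a b : Int × Int × String × String) : Bool :=
  if a.1 < b.1 then true
  else if b.1 < a.1 then false
  else pvTripLt a.2 b.2

-- sorted(rows): same insertion-sort shape as sorted's own algorithm, with the 4-tuple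
-- comparator written out.
def pvSortRows (l : List (Int × Int × String × String)) : List (Int × Int × String × String) :=
  l.foldl (fun acc x => PySem.List.insertBy (fun a b => pvQuadLt a b) x acc) []

-- one iteration of B's first loop: rank = chain_rank.setdefault(str(chain_id), len(chain_rank));
-- rows.append((rank, int(step_index), op, site_id))  (str()/int() are identities on str/int)
def pvRowStep (st : PySem.Dict String Int × List (Int × Int × String × String))
    (e : String × String × String × Int) :
    PySem.Dict String Int × List (Int × Int × String × String) :=
  let d := st.1.setdefault e.2.2.1 ((st.1.size : Int))
  (d, st.2 ++ [((d.get? e.2.2.1).getD 0, e.2.2.2, e.1, e.2.1)])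

def pvBuildRows (input : List (String × String × String × Int)) :
    PySem.Dict String Int × List (Int × Int × String × String) :=
  input.foldl pvRowStep (PySem.Dict.empty, [])

-- one iteration of B's second loop: counts[(rank, op)] += 1; out[(op, site_id)] = counts[(rank, op)]
def pvCountStep (st : PySem.Dict (Int × String) Int × PySem.Dict (String × String) Int)
    (q : Int × Int × String × String) :
    PySem.Dict (Int × String) Int × PySem.Dict (String × String) Int :=
  let counts := st.1.modify (q.1, q.2.2.1) 0 (· + 1)
  (counts, st.2.insert (q.2.2.1, q.2.2.2) (counts.getD (q.1, q.2.2.1) 0))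

def effect_step_ordinals_by_site_alt (step_info_by_site : List (String × String × String × Int)) : List (String × String × Int) :=
  ((pvSortRows (pvBuildRows step_info_by_site).2).foldl pvCountStep
    (PySem.Dict.empty, PySem.Dict.empty)).2.items.map (fun q => (q.1.1, q.1.2, q.2))

-- ===== PRECONDITION & SPEC =====
-- The Python argument is a dict keyed by (op, site_id), so its items carry pairwise-distinct
-- keys; Pre_ states exactly that dict invariant (an association list with duplicate keys does
-- not represent any Python input of this function).
def Pre_effect_step_ordinals_by_site (step_info_by_site : List (String × String × String × Int)) : Prop :=
  (step_info_by_site.map (fun e => (e.1, e.2.1))).Nodup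
instance (step_info_by_site : List (String × String × String × Int)) : Decidable (Pre_effect_step_ordinals_by_site step_info_by_site) := by unfold Pre_effect_step_ordinals_by_site; infer_instance

def pvWitness_effect_step_ordinals_by_site : (List (String × String × String × Int)) :=
  [("blur", "s1", "c1", 1), ("blur", "s2", "c1", 0), ("glow", "s3", "c2", 0)]

def Spec_effect_step_ordinals_by_site (step_info_by_site : List (String × String × String × Int)) (out : List (String × String × Int)) : Prop := out = effect_step_ordinals_by_site_alt step_info_by_site
instance (step_info_by_site : List (String × String × String × Int)) (out : List (String × String × Int)) : Decidable (Spec_effect_step_ordinals_by_site step_info_by_site out) := by unfold Spec_effect_step_ordinals_by_site; infer_instance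

-- ===== CLAIM (what is proved, stated in full; the proofs are below) =====
def Claim_equal_effect_step_ordinals_by_site : Prop := ∀ (step_info_by_site : List (String × String × String × Int)), Dom_effect_step_ordinals_by_site step_info_by_site → Pre_effect_step_ordinals_by_site step_info_by_site → Spec_effect_step_ordinals_by_site step_info_by_site (effect_step_ordinals_by_site step_info_by_site)

-- ===== LEMMAS AND PROOFS =====

-- spec-level views of the shared data
def pvTrip (e : String × String × String × Int) : Int × String × String := (e.2.2.2, e.1, e.2.1)
def pvKeyOf (e : String × String × String × Int) : String × String := (e.1, e.2.1)
def pvKey (t : Int × String × String) : String × String := (t.2.1, t.2.2)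
def pvChains (input : List (String × String × String × Int)) : List String :=
  PySem.Set.ofList (input.map (fun e => e.2.2.1))
def pvBkt (input : List (String × String × String × Int)) (c : String) :
    List (Int × String × String) :=
  (input.filter (fun e => e.2.2.1 == c)).map pvTrip
def pvRowF (input : List (String × String × String × Int)) (e : String × String × String × Int) :
    Int × Int × String × String :=
  ((List.idxOf e.2.2.1 (pvChains input) : Int), e.2.2.2, e.1, e.2.1)
def pvSegs (input : List (String × String × String × Int)) : List (Int × String) :=
  PySem.List.enumerate (pvChains input) 0
def pvL (input : List (String × String × String × Int)) : List (Int × Int × String × String) :=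
  (pvSegs input).flatMap (fun p => (pvSortSteps (pvBkt input p.2)).map (fun t => (p.1, t)))
-- the common per-chain emission sequence: running same-op count over one chain's sorted steps
def pvEmitA (done : List String) : List (Int × String × String) → List ((String × String) × Int)
  | [] => []
  | t :: r => ((t.2.1, t.2.2), (done.count t.2.1 : Int) + 1) :: pvEmitA (done ++ [t.2.1]) r
-- generic inner-loop step covering both ports' counter loops (A: kf = id over one chain's
-- counts dict; B: kf op = (rank, op) into the single global counts dict)
def pvStepG {κ : Type} [BEq κ] (kf : String → κ)
    (st : PySem.Dict κ Int × PySem.Dict (String × String) Int)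
    (t : Int × String × String) : PySem.Dict κ Int × PySem.Dict (String × String) Int :=
  let counts := st.1.modify (kf t.2.1) 0 (· + 1)
  (counts, st.2.insert (t.2.1, t.2.2) (counts.getD (kf t.2.1) 0))

-- ---- comparator facts ----
theorem pvTripLt_irrefl (a : Int × String × String) : pvTripLt a a = false := by
  simp [pvTripLt]

theorem pvTripLt_iff (a b : Int × String × String) :
    pvTripLt a b = true ↔
      a.1 < b.1 ∨ (a.1 = b.1 ∧ (a.2.1 < b.2.1 ∨ (a.2.1 = b.2.1 ∧ a.2.2 < b.2.2))) := by
  unfold pvTripLt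
  split_ifs with h1 h2 h3 h4
  · simp [h1]
  · simp only [Bool.false_eq_true, false_iff]
    rintro (h | ⟨he, _⟩)
    · exact h1 h
    · exact absurd h2 (by rw [he]; exact lt_irrefl _)
  · have he : a.1 = b.1 := le_antisymm (not_lt.mp h2) (not_lt.mp h1)
    simp [he, h3]
  · simp only [Bool.false_eq_true, false_iff]
    rintro (h | ⟨he, h | ⟨he2, _⟩⟩)
    · exact h1 h
    · exact absurd h4 (not_lt_of_gt h)
    · exact absurd h4 (by rw [he2]; exact lt_irrefl _)
  · have he : a.1 = b.1 := le_antisymm (not_lt.mp h2) (not_lt.mp h1)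
    have he2 : a.2.1 = b.2.1 := le_antisymm (not_lt.mp h4) (not_lt.mp h3)
    simp [he, he2]

theorem pvTripLt_trans {a b c : Int × String × String}
    (h1 : pvTripLt a b = true) (h2 : pvTripLt b c = true) : pvTripLt a c = true := by
  rw [pvTripLt_iff] at *
  rcases h1 with g | ⟨g1, g2⟩ <;> rcases h2 with f | ⟨f1, f2⟩
  · exact Or.inl (lt_trans g f)
  · exact Or.inl (lt_of_lt_of_le g (le_of_eq f1))
  · exact Or.inl (lt_of_le_of_lt (le_of_eq g1) f)
  · refine Or.inr ⟨g1.trans f1, ?_⟩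
    rcases g2 with g | ⟨g21, g22⟩ <;> rcases f2 with f | ⟨f21, f22⟩
    · exact Or.inl (lt_trans g f)
    · exact Or.inl (lt_of_lt_of_le g (le_of_eq f21))
    · exact Or.inl (lt_of_le_of_lt (le_of_eq g21) f)
    · exact Or.inr ⟨g21.trans f21, lt_trans g22 f22⟩

theorem pvTripLt_total_of_ne {a b : Int × String × String} (h : a ≠ b) :
    pvTripLt a b = true ∨ pvTripLt b a = true := by
  rw [pvTripLt_iff, pvTripLt_iff]
  rcases lt_trichotomy a.1 b.1 with h1 | h1 | h1
  · exact Or.inl (Or.inl h1)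
  · rcases lt_trichotomy a.2.1 b.2.1 with h2 | h2 | h2
    · exact Or.inl (Or.inr ⟨h1, Or.inl h2⟩)
    · rcases lt_trichotomy a.2.2 b.2.2 with h3 | h3 | h3
      · exact Or.inl (Or.inr ⟨h1, Or.inr ⟨h2, h3⟩⟩)
      · exact absurd (Prod.ext h1 (Prod.ext h2 h3)) h
      · exact Or.inr (Or.inr ⟨h1.symm, Or.inr ⟨h2.symm, h3⟩⟩)
    · exact Or.inr (Or.inr ⟨h1.symm, Or.inl h2⟩)
  · exact Or.inr (Or.inl h1)

theorem pvQuadLt_irrefl (a : Int × Int × String × String) : pvQuadLt a a = false := by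
  simp [pvQuadLt, pvTripLt_irrefl]

theorem pvQuadLt_iff (a b : Int × Int × String × String) :
    pvQuadLt a b = true ↔ a.1 < b.1 ∨ (a.1 = b.1 ∧ pvTripLt a.2 b.2 = true) := by
  unfold pvQuadLt
  split_ifs with h1 h2
  · simp [h1]
  · simp only [Bool.false_eq_true, false_iff]
    rintro (h | ⟨he, _⟩)
    · exact h1 h
    · exact absurd h2 (by rw [he]; exact lt_irrefl _)
  · have he : a.1 = b.1 := le_antisymm (not_lt.mp h2) (not_lt.mp h1)
    simp [he]

theorem pvQuadLt_trans {a b c : Int × Int × String × String}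
    (h1 : pvQuadLt a b = true) (h2 : pvQuadLt b c = true) : pvQuadLt a c = true := by
  rw [pvQuadLt_iff] at *
  rcases h1 with g | ⟨g1, g2⟩ <;> rcases h2 with f | ⟨f1, f2⟩
  · exact Or.inl (lt_trans g f)
  · exact Or.inl (lt_of_lt_of_le g (le_of_eq f1))
  · exact Or.inl (lt_of_le_of_lt (le_of_eq g1) f)
  · exact Or.inr ⟨g1.trans f1, pvTripLt_trans g2 f2⟩

theorem pvQuadLt_total_of_ne {a b : Int × Int × String × String} (h : a ≠ b) :
    pvQuadLt a b = true ∨ pvQuadLt b a = true := by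
  rw [pvQuadLt_iff, pvQuadLt_iff]
  rcases lt_trichotomy a.1 b.1 with h1 | h1 | h1
  · exact Or.inl (Or.inl h1)
  · have hne : a.2 ≠ b.2 := fun he => h (Prod.ext h1 he)
    rcases pvTripLt_total_of_ne hne with h2 | h2
    · exact Or.inl (Or.inr ⟨h1, h2⟩)
    · exact Or.inr (Or.inr ⟨h1.symm, h2⟩)
  · exact Or.inr (Or.inl h1)

theorem pvQuadLt_same_fst (x : Int) (t u : Int × String × String) :
    pvQuadLt (x, t) (x, u) = pvTripLt t u := by
  simp [pvQuadLt]

theorem pvQuadLt_of_fst_lt {a b : Int × Int × String × String} (h : a.1 < b.1) :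
    pvQuadLt a b = true := by
  unfold pvQuadLt; rw [if_pos h]

-- ---- generic insertion-sort facts ----
theorem pvInsertBy_perm {α : Type} (lt : α → α → Bool) (x : α) (ys : List α) :
    (PySem.List.insertBy lt x ys).Perm (x :: ys) := by
  induction ys with
  | nil => simp [PySem.List.insertBy]
  | cons y ys ih =>
    rw [PySem.List.insertBy]
    split
    · exact List.Perm.refl _
    · exact ((ih.cons y).trans (List.Perm.swap x y ys))

theorem pvFold_perm {α : Type} (lt : α → α → Bool) (l : List α) :
    ∀ acc, (l.foldl (fun acc x => PySem.List.insertBy lt x acc) acc).Perm (acc ++ l) := by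
  induction l with
  | nil => simp
  | cons x r ih =>
    intro acc
    simp only [List.foldl_cons]
    refine (ih _).trans ?_
    have h1 := (pvInsertBy_perm lt x acc).append_right r
    refine h1.trans ?_
    simpa using List.perm_middle.symm

theorem pvInsertBy_pairwise {α : Type} (lt : α → α → Bool)
    (htrans : ∀ {a b c : α}, lt a b = true → lt b c = true → lt a c = true)
    (htot : ∀ a b : α, a ≠ b → lt a b = true ∨ lt b a = true)
    (x : α) (ys : List α)
    (hpw : ys.Pairwise (fun a b => lt a b = true)) (hx : ∀ y ∈ ys, x ≠ y) :
    (PySem.List.insertBy lt x ys).Pairwise (fun a b => lt a b = true) := by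
  induction ys with
  | nil => simp [PySem.List.insertBy]
  | cons y ys ih =>
    rw [PySem.List.insertBy]
    rcases List.pairwise_cons.mp hpw with ⟨hy, hys⟩
    split
    · rename_i hlt
      refine List.pairwise_cons.mpr ⟨?_, hpw⟩
      intro z hz
      rcases List.mem_cons.mp hz with rfl | hz
      · exact hlt
      · exact htrans hlt (hy z hz)
    · rename_i hnlt
      have hyx : lt y x = true := by
        rcases htot x y (hx y List.mem_cons_self) with h | h
        · exact absurd h hnlt
        · exact h
      refine List.pairwise_cons.mpr ⟨?_, ih hys (fun z hz => hx z (List.mem_cons_of_mem y hz))⟩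
      intro z hz
      rcases (PySem.List.mem_insertBy _ x z ys).mp hz with rfl | hz
      · exact hyx
      · exact hy z hz

theorem pvFold_pairwise {α : Type} (lt : α → α → Bool)
    (htrans : ∀ {a b c : α}, lt a b = true → lt b c = true → lt a c = true)
    (htot : ∀ a b : α, a ≠ b → lt a b = true ∨ lt b a = true)
    (l : List α) :
    ∀ acc, acc.Pairwise (fun a b => lt a b = true) →
      (∀ a ∈ acc, a ∉ l) → l.Nodup →
      (l.foldl (fun acc x => PySem.List.insertBy lt x acc) acc).Pairwise
        (fun a b => lt a b = true) := by
  induction l with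
  | nil => intro acc h _ _; simpa using h
  | cons x r ih =>
    intro acc hpw hdisj hnd
    simp only [List.foldl_cons]
    rcases List.nodup_cons.mp hnd with ⟨hxr, hrnd⟩
    refine ih _ (pvInsertBy_pairwise lt htrans htot x acc hpw ?_) ?_ hrnd
    · intro y hy
      intro he
      exact hdisj y hy (he ▸ List.mem_cons_self)
    · intro a ha hb
      rcases (PySem.List.mem_insertBy _ x a acc).mp ha with rfl | ha
      · exact hxr hb
      · exact hdisj a ha (List.mem_cons_of_mem x hb)

theorem pvSortSteps_perm (l : List (Int × String × String)) : (pvSortSteps l).Perm l := by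
  simpa using pvFold_perm (fun a b => pvTripLt a b) l []

theorem pvSortSteps_pairwise (l : List (Int × String × String)) (h : l.Nodup) :
    (pvSortSteps l).Pairwise (fun a b => pvTripLt a b = true) := by
  unfold pvSortSteps
  exact pvFold_pairwise (fun a b => pvTripLt a b) (fun h1 h2 => pvTripLt_trans h1 h2)
    (fun _ _ hne => pvTripLt_total_of_ne hne) l [] (by simp) (by simp) h

theorem pvSortRows_perm (l : List (Int × Int × String × String)) : (pvSortRows l).Perm l := by
  simpa using pvFold_perm (fun a b => pvQuadLt a b) l []

theorem pvSortRows_pairwise (l : List (Int × Int × String × String)) (h : l.Nodup) :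
    (pvSortRows l).Pairwise (fun a b => pvQuadLt a b = true) := by
  unfold pvSortRows
  exact pvFold_pairwise (fun a b => pvQuadLt a b) (fun h1 h2 => pvQuadLt_trans h1 h2)
    (fun _ _ hne => pvQuadLt_total_of_ne hne) l [] (by simp) (by simp) h

-- ---- bucket facts ----
theorem pvBkt_map_key (input : List (String × String × String × Int)) (c : String) :
    (pvBkt input c).map pvKey = (input.filter (fun e => e.2.2.1 == c)).map pvKeyOf := by
  simp [pvBkt, List.map_map]
  intros
  rfl

theorem pvBkt_key_nodup (input : List (String × String × String × Int))
    (hglob : (input.map pvKeyOf).Nodup) (c : String) :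
    ((pvBkt input c).map pvKey).Nodup := by
  rw [pvBkt_map_key]
  exact hglob.sublist (List.filter_sublist.map pvKeyOf)

theorem pvBkt_nodup (input : List (String × String × String × Int))
    (hglob : (input.map pvKeyOf).Nodup) (c : String) :
    (pvBkt input c).Nodup :=
  (pvBkt_key_nodup input hglob c).of_map

theorem pvSort_key_nodup (input : List (String × String × String × Int))
    (hglob : (input.map pvKeyOf).Nodup) (c : String) :
    ((pvSortSteps (pvBkt input c)).map pvKey).Nodup :=
  (((pvSortSteps_perm (pvBkt input c)).map pvKey).nodup_iff).mpr (pvBkt_key_nodup input hglob c)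

-- ---- emission facts ----
theorem pvEmitA_map_fst (done : List String) (s : List (Int × String × String)) :
    (pvEmitA done s).map Prod.fst = s.map pvKey := by
  induction s generalizing done with
  | nil => rfl
  | cons t r ih => simp [pvEmitA, ih]; rfl

-- the shared inner loop: counts[kf op] += 1; out[(op, sid)] = counts[kf op] appends the
-- emission sequence, provided kf is injective and counts starts at done's tallies
theorem pvChain_items {κ : Type} [BEq κ] [LawfulBEq κ] [DecidableEq κ]
    (kf : String → κ) (hinj : Function.Injective kf) (s : List (Int × String × String)) :
    ∀ (done : List String) (counts : PySem.Dict κ Int)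
      (out0 : PySem.Dict (String × String) Int),
      (∀ op, counts.getD (kf op) 0 = (done.count op : Int)) →
      (∀ t ∈ s, out0.contains (pvKey t) = false) → (s.map pvKey).Nodup →
      (s.foldl (pvStepG kf) (counts, out0)).2.items = out0.items ++ pvEmitA done s := by
  induction s with
  | nil => intro done counts out0 _ _ _; simp [pvEmitA]
  | cons t r ih =>
    intro done counts out0 hgd hf hnd
    have hval : (counts.modify (kf t.2.1) 0 (· + 1)).getD (kf t.2.1) 0
        = (done.count t.2.1 : Int) + 1 := by
      rw [PySem.Dict.getD_modify_self, hgd t.2.1]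
    have hgd' : ∀ op, (counts.modify (kf t.2.1) 0 (· + 1)).getD (kf op) 0
        = ((done ++ [t.2.1]).count op : Int) := by
      intro op
      rw [PySem.Dict.getD_modify, List.count_append]
      by_cases hop : op = t.2.1
      · subst hop
        simp only [if_pos rfl, hgd t.2.1]
        have h1 : List.count t.2.1 [t.2.1] = 1 := by simp
        rw [h1]
        push_cast
        omega
      · rw [if_neg (fun h => hop (hinj h)), hgd op]
        have h0 : List.count op [t.2.1] = 0 :=
          List.count_eq_zero.mpr (by simp; exact fun h => hop h)
        rw [h0]
        push_cast
        omega
    have hfh : out0.contains (t.2.1, t.2.2) = false := hf t List.mem_cons_self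
    have hnd' := hnd
    rw [List.map_cons, List.nodup_cons] at hnd'
    simp only [List.foldl_cons]
    show (r.foldl (pvStepG kf) (counts.modify (kf t.2.1) 0 (· + 1),
        out0.insert (t.2.1, t.2.2) ((counts.modify (kf t.2.1) 0 (· + 1)).getD (kf t.2.1) 0))).2.items
      = out0.items ++ pvEmitA done (t :: r)
    rw [ih (done ++ [t.2.1]) (counts.modify (kf t.2.1) 0 (· + 1)) _ hgd' ?_ hnd'.2]
    · rw [PySem.Dict.items_insert_of_not_contains (h := hfh), hval]
      simp [pvEmitA]
    · intro u hu
      rw [PySem.Dict.contains_insert, Bool.or_eq_false_iff]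
      have hne : pvKey u ≠ pvKey t := by
        intro he
        exact hnd'.1 (he ▸ List.mem_map_of_mem hu)
      exact ⟨beq_eq_false_iff_ne.mpr hne, hf u (List.mem_cons_of_mem t hu)⟩

theorem pvFoldG_fst {κ : Type} [BEq κ] (kf : String → κ) (s : List (Int × String × String)) :
    ∀ st : PySem.Dict κ Int × PySem.Dict (String × String) Int,
      (s.foldl (pvStepG kf) st).1 = s.foldl (fun d t => d.modify (kf t.2.1) 0 (· + 1)) st.1 := by
  induction s with
  | nil => intro st; rfl
  | cons t r ih =>
    intro st
    simp only [List.foldl_cons]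
    rw [ih]
    rfl

theorem pvFoldModify_getD {κ : Type} [BEq κ] [LawfulBEq κ] [DecidableEq κ] (kf : String → κ)
    (s : List (Int × String × String)) :
    ∀ (c : PySem.Dict κ Int) (v : κ),
      (s.foldl (fun d t => d.modify (kf t.2.1) 0 (· + 1)) c).getD v 0
        = c.getD v 0 + ((s.map (fun t => kf t.2.1)).count v : Int) := by
  induction s with
  | nil => intro c v; simp
  | cons t r ih =>
    intro c v
    simp only [List.foldl_cons, List.map_cons]
    rw [ih, PySem.Dict.getD_modify, List.count_cons]
    by_cases h : v = kf t.2.1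
    · have hb : (kf t.2.1 == v) = true := beq_iff_eq.mpr h.symm
      rw [if_pos h, hb, h, if_pos rfl]
      push_cast
      omega
    · have hb : (kf t.2.1 == v) = false := beq_eq_false_iff_ne.mpr (fun he => h he.symm)
      rw [if_neg h, hb]
      simp

theorem pvFoldG_getD {κ : Type} [BEq κ] [LawfulBEq κ] [DecidableEq κ] (kf : String → κ)
    (s : List (Int × String × String))
    (st : PySem.Dict κ Int × PySem.Dict (String × String) Int) (v : κ) :
    ((s.foldl (pvStepG kf) st).1).getD v 0
      = st.1.getD v 0 + ((s.map (fun t => kf t.2.1)).count v : Int) := by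
  rw [pvFoldG_fst]
  exact pvFoldModify_getD kf s st.1 v

-- ---- grouping / flattening permutation facts ----
theorem pvFlatMapPerm {α β : Type} (l : List α) (f g : α → List β)
    (h : ∀ x ∈ l, (f x).Perm (g x)) : (l.flatMap f).Perm (l.flatMap g) := by
  induction l with
  | nil => simp
  | cons a r ih =>
    simp only [List.flatMap_cons]
    exact (h a List.mem_cons_self).append
      (ih (fun x hx => h x (List.mem_cons_of_mem a hx)))

theorem pvGroupPerm {α : Type} (key : α → String) :
    ∀ (cs : List String) (l : List α), cs.Nodup → (∀ x ∈ l, key x ∈ cs) →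
      l.Perm (cs.flatMap (fun c => l.filter (fun x => key x == c))) := by
  intro cs
  induction cs with
  | nil =>
    intro l _ hcov
    cases l with
    | nil => simp
    | cons a r => exact absurd (hcov a List.mem_cons_self) (by simp)
  | cons c rest ih =>
    intro l hnd hcov
    rcases List.nodup_cons.mp hnd with ⟨hc, hrest⟩
    have h1 : (l.filter (fun x => key x == c) ++ l.filter (fun x => !(key x == c))).Perm l :=
      List.filter_append_perm _ l
    have hcov' : ∀ x ∈ l.filter (fun x => !(key x == c)), key x ∈ rest := by
      intro x hx
      rcases List.mem_filter.mp hx with ⟨hxl, hxc⟩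
      rcases List.mem_cons.mp (hcov x hxl) with he | hm
      · exact absurd he (by simpa using hxc)
      · exact hm
    have h2 := ih (l.filter (fun x => !(key x == c))) hrest hcov'
    have h3 : ∀ c' ∈ rest, (l.filter (fun x => !(key x == c))).filter (fun x => key x == c')
        = l.filter (fun x => key x == c') := by
      intro c' hc'
      rw [List.filter_filter]
      apply List.filter_congr
      intro x _
      by_cases hx : key x = c'
      · have hne : c' ≠ c := fun he => hc (he ▸ hc')
        simp [hx, hne]
      · simp [hx]
    have h4 : rest.flatMap (fun c' => (l.filter (fun x => !(key x == c))).filter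
        (fun x => key x == c')) = rest.flatMap (fun c' => l.filter (fun x => key x == c')) := by
      rw [List.flatMap_def, List.flatMap_def]
      exact congrArg List.flatten (List.map_congr_left h3)
    rw [List.flatMap_cons]
    refine h1.symm.trans ?_
    refine List.Perm.append_left _ ?_
    rw [← h4]
    exact h2

-- ---- B's first loop builds the chain-rank rows ----
theorem pvRows_go (l : List (String × String × String × Int)) :
    ∀ (S : List String) (d : PySem.Dict String Int)
      (rows : List (Int × Int × String × String)),
      d.keys = S →
      (∀ c, d.get? c = if c ∈ S then some ((List.idxOf c S : Nat) : Int) else none) →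
      (l.foldl pvRowStep (d, rows)).2
        = rows ++ l.map (fun e =>
            (((List.idxOf e.2.2.1 (PySem.Set.update S (l.map (fun x => x.2.2.1))) : Nat) : Int),
              e.2.2.2, e.1, e.2.1)) := by
  induction l with
  | nil =>
    intro S d rows _ _
    simp
  | cons e r ih =>
    intro S d rows hkeys hget
    have hsz : d.size = S.length := by
      rw [← hkeys]
      simp [PySem.Dict.size, PySem.Dict.keys]
    have hupd : PySem.Set.update S ((e :: r).map (fun x => x.2.2.1))
        = PySem.Set.update (PySem.Set.add S e.2.2.1) (r.map (fun x => x.2.2.1)) := rfl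
    by_cases hc : e.2.2.1 ∈ S
    · have hcon : d.contains e.2.2.1 = true := by
        rw [PySem.Dict.contains_iff_mem_keys, hkeys]; exact hc
      have hadd : PySem.Set.add S e.2.2.1 = S := by
        simp [PySem.Set.add, PySem.Set.contains, hc]
      have hd' : d.setdefault e.2.2.1 ((d.size : Int)) = d :=
        PySem.Dict.setdefault_of_contains d _ hcon
      have hv : ((d.setdefault e.2.2.1 ((d.size : Int))).get? e.2.2.1).getD 0
          = ((List.idxOf e.2.2.1 S : Nat) : Int) := by
        rw [hd', hget e.2.2.1, if_pos hc]
        rfl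
      have hidx : List.idxOf e.2.2.1 (PySem.Set.update S (r.map (fun x => x.2.2.1)))
          = List.idxOf e.2.2.1 S := by
        rw [PySem.Set.update_eq_append_filter, List.idxOf_append, if_pos hc]
      simp only [List.foldl_cons, pvRowStep]
      rw [hv, hd', ih S d _ hkeys hget, hupd, hadd, List.map_cons, hidx]
      simp
    · have hcon : d.contains e.2.2.1 = false := by
        cases hb : d.contains e.2.2.1
        · rfl
        · exact absurd (hkeys ▸ (PySem.Dict.contains_iff_mem_keys d e.2.2.1).mp hb) hc
      have hd' : d.setdefault e.2.2.1 ((d.size : Int)) = d.insert e.2.2.1 ((d.size : Int)) :=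
        PySem.Dict.setdefault_of_not_contains d _ hcon
      have hadd : PySem.Set.add S e.2.2.1 = S ++ [e.2.2.1] := by
        simp [PySem.Set.add, PySem.Set.contains, hc]
      have hkeys' : (d.insert e.2.2.1 ((d.size : Int))).keys = S ++ [e.2.2.1] := by
        rw [PySem.Dict.keys_insert_of_not_contains d _ hcon, hkeys]
      have hget' : ∀ c, (d.insert e.2.2.1 ((d.size : Int))).get? c
          = if c ∈ S ++ [e.2.2.1] then some ((List.idxOf c (S ++ [e.2.2.1]) : Nat) : Int)
            else none := by
        intro c
        rw [PySem.Dict.get?_insert]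
        by_cases hce : c = e.2.2.1
        · subst hce
          rw [if_pos rfl, if_pos (by simp)]
          rw [List.idxOf_append, if_neg hc, List.idxOf_cons_self, hsz]
          norm_num
        · rw [if_neg hce, hget c]
          by_cases hcS : c ∈ S
          · rw [if_pos hcS, if_pos (by simp [hcS])]
            rw [List.idxOf_append, if_pos hcS]
          · rw [if_neg hcS, if_neg (by simp [hcS, hce])]
      have hv : ((d.insert e.2.2.1 ((d.size : Int))).get? e.2.2.1).getD 0
          = ((S.length : Nat) : Int) := by
        rw [PySem.Dict.get?_insert_self, hsz]
        rfl
      have hidx : List.idxOf e.2.2.1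
          (PySem.Set.update (S ++ [e.2.2.1]) (r.map (fun x => x.2.2.1))) = S.length := by
        rw [PySem.Set.update_eq_append_filter, List.idxOf_append, if_pos (by simp)]
        rw [List.idxOf_append, if_neg hc, List.idxOf_cons_self]
        omega
      simp only [List.foldl_cons, pvRowStep]
      rw [hd', hv, ih (S ++ [e.2.2.1]) _ _ hkeys' hget', hupd, hadd, List.map_cons, hidx]
      simp

theorem pvBuildRows_snd (input : List (String × String × String × Int)) :
    (pvBuildRows input).2 = input.map (pvRowF input) := by
  unfold pvBuildRows
  rw [pvRows_go input [] PySem.Dict.empty [] (by simp [PySem.Dict.keys_empty])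
      (by intro c; simp [PySem.Dict.get?_empty])]
  simp only [List.nil_append]
  apply List.map_congr_left
  intro e _
  unfold pvRowF pvChains
  rw [show PySem.Set.update ([] : List String) (input.map (fun x => x.2.2.1))
      = PySem.Set.ofList (input.map (fun e => e.2.2.1)) from rfl]

-- ---- the globally sorted row list is the chain-by-chain sorted flattening ----
theorem pvSegs_map_snd (input : List (String × String × String × Int)) :
    (pvSegs input).map (fun p => p.2) = pvChains input :=
  PySem.List.map_snd_enumerate _ _

theorem pvSegMapEq (input : List (String × String × String × Int)) :
    (pvSegs input).map (fun p => (pvBkt input p.2).map (fun t => (p.1, t)))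
      = (pvChains input).map (fun c =>
          (pvBkt input c).map (fun t => (((List.idxOf c (pvChains input) : Nat) : Int), t))) := by
  apply List.ext_getElem
  · simp [pvSegs, PySem.List.length_enumerate]
  · intro k h1 h2
    have hk : k < (pvChains input).length := by
      simpa [pvSegs, PySem.List.length_enumerate] using h1
    simp only [List.getElem_map, pvSegs]
    rw [PySem.List.getElem_enumerate _ _ k (by simpa [PySem.List.length_enumerate] using hk)]
    have hidx : List.idxOf (pvChains input)[k] (pvChains input) = k :=
      List.Nodup.idxOf_getElem (PySem.Set.nodup_ofList _) k hk
    simp [hidx]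

theorem pvSortRows_eq (input : List (String × String × String × Int))
    (hglob : (input.map pvKeyOf).Nodup) :
    pvSortRows ((pvBuildRows input).2) = pvL input := by
  have hrows := pvBuildRows_snd input
  -- rowsB is duplicate-free
  have hmapkeys : ((input.map (pvRowF input)).map (fun q => (q.2.2.1, q.2.2.2)))
      = input.map pvKeyOf := by
    rw [List.map_map]
    rfl
  have hndrows : (input.map (pvRowF input)).Nodup :=
    List.Nodup.of_map _ (hmapkeys ▸ hglob)
  -- permutation: sorted rows ~ pvL
  have hperm1 : (pvSortRows ((pvBuildRows input).2)).Perm (input.map (pvRowF input)) := by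
    rw [hrows]; exact pvSortRows_perm _
  have hgroup : input.Perm ((pvChains input).flatMap
      (fun c => input.filter (fun e => e.2.2.1 == c))) :=
    pvGroupPerm (fun e => e.2.2.1) (pvChains input) input (PySem.Set.nodup_ofList _)
      (fun x hx => (PySem.Set.mem_ofList _ _).mpr (List.mem_map_of_mem hx))
  have hmapflat : ((pvChains input).flatMap
        (fun c => input.filter (fun e => e.2.2.1 == c))).map (pvRowF input)
      = (pvChains input).flatMap (fun c =>
          (pvBkt input c).map (fun t => (((List.idxOf c (pvChains input) : Nat) : Int), t))) := by
    rw [List.map_flatMap]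
    rw [List.flatMap_def, List.flatMap_def]
    apply congrArg List.flatten
    apply List.map_congr_left
    intro c _
    have : (input.filter (fun e => e.2.2.1 == c)).map (pvRowF input)
        = (input.filter (fun e => e.2.2.1 == c)).map
            (fun e => (((List.idxOf c (pvChains input) : Nat) : Int), pvTrip e)) := by
      apply List.map_congr_left
      intro e he
      have hce : e.2.2.1 = c := by simpa using (List.mem_filter.mp he).2
      unfold pvRowF pvTrip
      rw [hce]
    rw [this, pvBkt, List.map_map]
    rfl
  have hperm2 : (pvL input).Perm ((pvChains input).flatMap (fun c =>
      (pvBkt input c).map (fun t => (((List.idxOf c (pvChains input) : Nat) : Int), t)))) := by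
    have hP : (pvL input).Perm ((pvSegs input).flatMap
        (fun p => (pvBkt input p.2).map (fun t => (p.1, t)))) := by
      unfold pvL
      exact pvFlatMapPerm _ _ _ (fun p _ => (pvSortSteps_perm _).map _)
    refine hP.trans ?_
    rw [List.flatMap_def, List.flatMap_def, pvSegMapEq input]
  have hperm : (pvSortRows ((pvBuildRows input).2)).Perm (pvL input) := by
    refine hperm1.trans ?_
    refine ((hgroup.map (pvRowF input)).trans ?_).trans hperm2.symm
    rw [hmapflat]
  -- both sides are strictly pvQuadLt-sorted
  have hpw1 : (pvSortRows ((pvBuildRows input).2)).Pairwise (fun a b => pvQuadLt a b = true) := by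
    rw [hrows]
    exact pvSortRows_pairwise _ hndrows
  have hpw2 : (pvL input).Pairwise (fun a b => pvQuadLt a b = true) := by
    unfold pvL
    rw [List.flatMap_def]
    rw [List.pairwise_flatten]
    constructor
    · intro l hl
      rcases List.mem_map.mp hl with ⟨p, hp, rfl⟩
      rw [List.pairwise_map]
      refine (pvSortSteps_pairwise _ ?_).imp ?_
      · rcases (PySem.List.mem_enumerate_iff _ _ p).mp hp with ⟨k, hk, rfl⟩
        exact pvBkt_nodup input hglob _
      · intro t u h
        rw [pvQuadLt_same_fst]
        exact h
    · rw [List.pairwise_map]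
      refine (PySem.List.pairwise_lt_enumerate _ _).imp ?_
      intro p q h x hx y hy
      rcases List.mem_map.mp hx with ⟨t, _, rfl⟩
      rcases List.mem_map.mp hy with ⟨u, _, rfl⟩
      exact pvQuadLt_of_fst_lt h
  exact List.Perm.eq_of_pairwise
    (fun a b _ _ h1 h2 => by
      by_contra hne
      have := pvQuadLt_trans h1 h2
      rw [pvQuadLt_irrefl] at this
      exact Bool.false_ne_true this)
    hpw1 hpw2 hperm

-- ---- outer loops emit the same flattened sequence ----
theorem pvOuterA (input : List (String × String × String × Int))
    (hglob : (input.map pvKeyOf).Nodup) :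
    ∀ (cs : List String), cs.Nodup →
      ∀ out : PySem.Dict (String × String) Int,
        (∀ e ∈ input, e.2.2.1 ∈ cs → out.contains (pvKeyOf e) = false) →
        (cs.foldl (fun o c => ((pvSortSteps (pvBkt input c)).foldl pvChainStep
            (PySem.Dict.empty, o)).2) out).items
          = out.items ++ cs.flatMap (fun c => pvEmitA [] (pvSortSteps (pvBkt input c))) := by
  intro cs
  induction cs with
  | nil => intro _ out _; simp
  | cons c rest ih =>
    intro hnd out hout
    rcases List.nodup_cons.mp hnd with ⟨hc, hrest⟩
    have hf : ∀ t ∈ pvSortSteps (pvBkt input c), out.contains (pvKey t) = false := by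
      intro t ht
      have htb : t ∈ pvBkt input c := (pvSortSteps_perm _).mem_iff.mp ht
      rcases List.mem_map.mp htb with ⟨e, he, rfl⟩
      have hee := List.mem_filter.mp he
      have hchain : e.2.2.1 = c := by simpa using hee.2
      exact hout e hee.1 (by rw [hchain]; exact List.mem_cons_self)
    have hstep : ∀ st, (pvSortSteps (pvBkt input c)).foldl pvChainStep st
        = (pvSortSteps (pvBkt input c)).foldl (pvStepG (fun op => op)) st := fun st => rfl
    have hA := pvChain_items (fun op => op) (fun _ _ h => h) (pvSortSteps (pvBkt input c)) []
      PySem.Dict.empty out (by intro op; simp [PySem.Dict.getD_empty]) hf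
      (pvSort_key_nodup input hglob c)
    simp only [List.foldl_cons, List.flatMap_cons]
    rw [hstep]
    rw [ih hrest _ ?_]
    · rw [hA, List.append_assoc]
    · intro e he hin
      set R := ((pvSortSteps (pvBkt input c)).foldl (pvStepG (fun op => op))
        (PySem.Dict.empty, out)).2 with hR
      cases hcon : R.contains (pvKeyOf e)
      · rfl
      · exfalso
        have hmem := (PySem.Dict.contains_iff_mem_keys _ _).mp hcon
        have hkeysR : R.keys = (out.items ++ pvEmitA [] (pvSortSteps (pvBkt input c))).map
            Prod.fst := by
          simp only [PySem.Dict.keys, hA]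
        rw [hkeysR, List.map_append, List.mem_append] at hmem
        rcases hmem with hm | hm
        · have : out.contains (pvKeyOf e) = true :=
            (PySem.Dict.contains_iff_mem_keys _ _).mpr hm
          rw [hout e he (List.mem_cons_of_mem c hin)] at this
          exact Bool.false_ne_true this
        · rw [pvEmitA_map_fst] at hm
          rcases List.mem_map.mp hm with ⟨t, ht, hkt⟩
          have htb : t ∈ pvBkt input c := (pvSortSteps_perm _).mem_iff.mp ht
          rcases List.mem_map.mp htb with ⟨e', he', rfl⟩
          have hee' := List.mem_filter.mp he'
          have hchain' : e'.2.2.1 = c := by simpa using hee'.2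
          have hkk : pvKeyOf e' = pvKeyOf e := hkt
          have hee : e' = e := List.inj_on_of_nodup_map hglob hee'.1 he hkk
          rw [hee] at hchain'
          rw [hchain'] at hin
          exact hc hin

theorem pvOuterB (input : List (String × String × String × Int))
    (hglob : (input.map pvKeyOf).Nodup) :
    ∀ (ps : List (Int × String)),
      (ps.map Prod.fst).Nodup → (ps.map Prod.snd).Nodup →
      ∀ (counts : PySem.Dict (Int × String) Int) (out : PySem.Dict (String × String) Int),
        (∀ p ∈ ps, ∀ op : String, counts.getD (p.1, op) 0 = 0) →
        (∀ e ∈ input, e.2.2.1 ∈ ps.map Prod.snd → out.contains (pvKeyOf e) = false) →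
        ((ps.flatMap (fun p => (pvSortSteps (pvBkt input p.2)).map (fun t => (p.1, t)))).foldl
            pvCountStep (counts, out)).2.items
          = out.items ++ ps.flatMap (fun p => pvEmitA [] (pvSortSteps (pvBkt input p.2))) := by
  intro ps
  induction ps with
  | nil => intro _ _ counts out _ _; simp
  | cons p rest ih =>
    intro hfst hsnd counts out hcnt hout
    rw [List.map_cons, List.nodup_cons] at hfst hsnd
    have hf : ∀ t ∈ pvSortSteps (pvBkt input p.2), out.contains (pvKey t) = false := by
      intro t ht
      have htb : t ∈ pvBkt input p.2 := (pvSortSteps_perm _).mem_iff.mp ht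
      rcases List.mem_map.mp htb with ⟨e, he, rfl⟩
      have hee := List.mem_filter.mp he
      have hchain : e.2.2.1 = p.2 := by simpa using hee.2
      exact hout e hee.1 (by rw [List.map_cons]; rw [hchain]; exact List.mem_cons_self)
    have hinjp : Function.Injective (fun op : String => ((p.1, op) : Int × String)) := by
      intro a b h
      simpa using h
    have hA := pvChain_items (fun op => (p.1, op)) hinjp (pvSortSteps (pvBkt input p.2)) []
      counts out (by intro op; simpa using hcnt p List.mem_cons_self op) hf
      (pvSort_key_nodup input hglob p.2)
    have hstep : ∀ st, ((pvSortSteps (pvBkt input p.2)).map (fun t => (p.1, t))).foldl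
        pvCountStep st = (pvSortSteps (pvBkt input p.2)).foldl (pvStepG (fun op => (p.1, op))) st := by
      intro st
      rw [List.foldl_map]
      rfl
    simp only [List.flatMap_cons, List.foldl_append]
    rw [hstep]
    set R := (pvSortSteps (pvBkt input p.2)).foldl (pvStepG (fun op => (p.1, op)))
      (counts, out) with hR
    have hcnt' : ∀ p' ∈ rest, ∀ op : String, R.1.getD (p'.1, op) 0 = 0 := by
      intro p' hp' op
      rw [hR, pvFoldG_getD]
      have h0 : counts.getD (p'.1, op) 0 = 0 := hcnt p' (List.mem_cons_of_mem p hp') op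
      have hc0 : ((pvSortSteps (pvBkt input p.2)).map
          (fun t => ((p.1, t.2.1) : Int × String))).count ((p'.1, op) : Int × String) = 0 := by
        rw [List.count_eq_zero]
        intro hmem
        rcases List.mem_map.mp hmem with ⟨t, _, hteq⟩
        have : p.1 = p'.1 := (Prod.mk.injEq _ _ _ _).mp hteq |>.1
        exact hfst.1 (this ▸ List.mem_map_of_mem hp')
      rw [h0, hc0]
      simp
    have hout' : ∀ e ∈ input, e.2.2.1 ∈ rest.map Prod.snd →
        R.2.contains (pvKeyOf e) = false := by
      intro e he hin
      cases hcon : R.2.contains (pvKeyOf e)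
      · rfl
      · exfalso
        have hmem := (PySem.Dict.contains_iff_mem_keys _ _).mp hcon
        have hkeysR : R.2.keys = (out.items ++ pvEmitA [] (pvSortSteps (pvBkt input p.2))).map
            Prod.fst := by
          simp only [PySem.Dict.keys, hA]
        rw [hkeysR, List.map_append, List.mem_append] at hmem
        rcases hmem with hm | hm
        · have : out.contains (pvKeyOf e) = true :=
            (PySem.Dict.contains_iff_mem_keys _ _).mpr hm
          rw [hout e he (by rw [List.map_cons]; exact List.mem_cons_of_mem _ hin)] at this
          exact Bool.false_ne_true this
        · rw [pvEmitA_map_fst] at hm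
          rcases List.mem_map.mp hm with ⟨t, ht, hkt⟩
          have htb : t ∈ pvBkt input p.2 := (pvSortSteps_perm _).mem_iff.mp ht
          rcases List.mem_map.mp htb with ⟨e', he', rfl⟩
          have hee' := List.mem_filter.mp he'
          have hchain' : e'.2.2.1 = p.2 := by simpa using hee'.2
          have hkk : pvKeyOf e' = pvKeyOf e := hkt
          have hee : e' = e := List.inj_on_of_nodup_map hglob hee'.1 he hkk
          rw [hee] at hchain'
          rw [hchain'] at hin
          exact hsnd.1 hin
    have ihres := ih hfst.2 hsnd.2 R.1 R.2 hcnt' hout'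
    rw [Prod.mk.eta] at ihres
    rw [ihres, hR, hA, List.append_assoc]

-- ---- helpers for the main assembly ----
theorem pvItemsEmpty {κ ν : Type} [BEq κ] : (PySem.Dict.empty : PySem.Dict κ ν).items = [] := by
  have h := PySem.Dict.keys_empty (κ := κ) (ν := ν)
  simpa [PySem.Dict.keys] using (List.map_eq_nil_iff.mp h)

theorem pvMain (input : List (String × String × String × Int))
    (hpre : Pre_effect_step_ordinals_by_site input) :
    effect_step_ordinals_by_site input = effect_step_ordinals_by_site_alt input := by
  unfold Pre_effect_step_ordinals_by_site at hpre
  have hglob : (input.map pvKeyOf).Nodup := hpre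
  unfold effect_step_ordinals_by_site effect_step_ordinals_by_site_alt
  -- A's grouping dict
  have hgetD : ∀ c, (pvStepsByChain input).getD c [] = pvBkt input c := by
    intro c
    have h := PySem.Dict.getD_foldl_modify_append
      (input.map (fun e => (e.2.2.1, pvTrip e))) PySem.Dict.empty c
    simp only [List.foldl_map] at h
    simp only [pvTrip] at h
    unfold pvStepsByChain
    rw [h]
    simp only [PySem.Dict.getD_empty, List.nil_append]
    rw [List.filter_map, List.map_map]
    simp only [pvBkt, pvTrip]
    rfl
  have hkeys : (pvStepsByChain input).keys = pvChains input := by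
    unfold pvStepsByChain pvChains
    rw [PySem.Dict.keys_foldl_modify_key input (fun e => e.2.2.1) []
        (fun d e => (· ++ [(e.2.2.2, e.1, e.2.1)])) PySem.Dict.empty]
    rw [PySem.Set.update_eq_append_filter]
    simp [PySem.Dict.keys_empty, PySem.Set.empty]
  have hknd : (pvStepsByChain input).keys.Nodup := by
    unfold pvStepsByChain
    exact PySem.Dict.nodup_keys_foldl_modify_key input (fun e => e.2.2.1) []
      (fun d e => (· ++ [(e.2.2.2, e.1, e.2.1)])) PySem.Dict.empty (by simp [PySem.Dict.keys_empty])
  have hitems : (pvStepsByChain input).items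
      = (pvChains input).map (fun c => (c, pvBkt input c)) := by
    rw [PySem.Dict.items_eq_map_keys _ hknd []]
    rw [hkeys]
    apply List.map_congr_left
    intro c _
    rw [hgetD c]
  -- A's out items
  have hA : ((pvStepsByChain input).items.foldl
      (fun out p => ((pvSortSteps p.2).foldl pvChainStep (PySem.Dict.empty, out)).2)
      PySem.Dict.empty).items
      = (pvChains input).flatMap (fun c => pvEmitA [] (pvSortSteps (pvBkt input c))) := by
    rw [hitems, List.foldl_map]
    rw [pvOuterA input hglob (pvChains input) (PySem.Set.nodup_ofList _) PySem.Dict.empty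
      (by intro e _ _; simp [PySem.Dict.contains_empty])]
    rw [pvItemsEmpty, List.nil_append]
  -- B's out items
  have hB : (((pvSortRows (pvBuildRows input).2).foldl pvCountStep
      (PySem.Dict.empty, PySem.Dict.empty)).2).items
      = (pvChains input).flatMap (fun c => pvEmitA [] (pvSortSteps (pvBkt input c))) := by
    rw [pvSortRows_eq input hglob]
    unfold pvL
    rw [pvOuterB input hglob (pvSegs input)
      (by
        have := PySem.List.pairwise_lt_enumerate (pvChains input) 0
        have hpw : ((pvSegs input).map Prod.fst).Pairwise (· < ·) := by
          rw [List.pairwise_map]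
          exact this
        exact hpw.imp (fun h => ne_of_lt h))
      (by rw [show (pvSegs input).map Prod.snd = pvChains input from pvSegs_map_snd input]
          exact PySem.Set.nodup_ofList _)
      PySem.Dict.empty PySem.Dict.empty
      (by intro p _ op; simp [PySem.Dict.getD_empty])
      (by intro e _ _; simp [PySem.Dict.contains_empty])]
    rw [pvItemsEmpty, List.nil_append]
    rw [List.flatMap_def, List.flatMap_def]
    apply congrArg List.flatten
    rw [← pvSegs_map_snd input, List.map_map]
    rfl
  rw [hA, hB]

-- ===== VERDICT (by name: the statement is the Claim_ definition above) =====
theorem effect_step_ordinals_by_site_spec : Claim_equal_effect_step_ordinals_by_site := by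
  intro input _ hpre
  unfold Spec_effect_step_ordinals_by_site
  exact pvMain input hpre
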